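-- pv_equiv track=rewrite | github.com/r-ddle/codec-bot | src/cogs/word_up.py | detect_gibberish
-- ===== SOURCE A (Python) =====
-- def detect_gibberish(word: str) -> bool:
--     """
--     Detect if a word is likely gibberish.
--     Very lenient - only catches obvious spam/exploits.
--
--     Args:
--         word: Word to check
--
--     Returns:
--         True if likely gibberish, False otherwise
--     """
--     word = word.lower()
--
--     # Too short or too long
--     if len(word) < 2 or len(word) > 30:
--         return True
--
--     # Check for too many repeated characters (obvious spam)
--     for i in range(len(word) - 4):
--         if word[i] == word[i+1] == word[i+2] == word[i+3] == word[i+4]: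
--             return True
--
--     # Must have at least one vowel (y counts as vowel)
--     vowels = 'aeiouy'
--     if not any(char in vowels for char in word):
--         return True
--
--     # Check for extreme consonant streaks (more than 7)
--     consonant_streak = 0
--     for char in word:
--         if char not in vowels:
--             consonant_streak += 1
--             if consonant_streak > 7:
--                 return True
--         else:
--             consonant_streak = 0
--
--     return False
-- ===== SOURCE B (Python) =====
-- def _runs(s, key=lambda c: c):
--     """Maximal runs of equal key-values: list of (key, run_length), left to right."""
--     out = []
--     i = 0
--     while i < len(s):
--         j = i
--         k = key(s[i])
--         while j < len(s) and key(s[j]) == k: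
--             j += 1
--         out.append((k, j - i))
--         i = j
--     return out
--
--
-- def detect_gibberish(word: str) -> bool:
--     word = word.lower()
--     if len(word) < 2 or len(word) > 30:
--         return True
--     # a window of 5 equal consecutive chars exists iff some maximal run has length >= 5
--     if any(n >= 5 for _, n in _runs(word)):
--         return True
--     vowels = 'aeiouy'
--     if not any(c in vowels for c in word):
--         return True
--     # a consonant streak exceeding 7 exists iff some maximal consonant run has length >= 8
--     return any(k and n >= 8 for k, n in _runs(word, key=lambda c: c not in vowels))
-- ===== Notes on version B (the rewrite author's own statement) =====
-- stated objective: alternative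
-- what changed: Replaces A's sliding 5-index window and running consonant-streak counter by a single run-length decomposition helper (maximal runs of equal key values, itertools.groupby-style but hand-rolled since A imports nothing): a window of 5 equal chars exists iff some maximal run has length >= 5, and a streak > 7 iff some maximal consonant run has length >= 8.
import Mathlib
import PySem

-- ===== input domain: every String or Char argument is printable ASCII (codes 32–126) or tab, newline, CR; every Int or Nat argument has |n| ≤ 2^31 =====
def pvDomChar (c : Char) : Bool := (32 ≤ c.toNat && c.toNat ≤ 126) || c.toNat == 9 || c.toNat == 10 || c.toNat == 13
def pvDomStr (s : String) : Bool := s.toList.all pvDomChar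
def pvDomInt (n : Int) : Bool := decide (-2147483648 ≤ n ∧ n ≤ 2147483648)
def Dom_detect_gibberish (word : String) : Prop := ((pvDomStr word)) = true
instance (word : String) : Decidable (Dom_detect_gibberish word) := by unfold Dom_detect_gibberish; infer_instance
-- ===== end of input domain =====

-- B replaces A's sliding 5-index window and running consonant-streak counter by a
-- run-length decomposition into maximal runs (alternative decomposition, same cost).

-- ===== PORT A =====
-- vowels = 'aeiouy'
def pvVowels : List Char := ['a', 'e', 'i', 'o', 'u', 'y']

-- A's consonant-streak loop: 'for char in word: …' with the running counter and early return
def pvStreakLoop (streak : Int) : List Char → Bool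
  | [] => false
  | c :: cs =>
    if !(pvVowels.contains c) then
      (if 7 < streak + 1 then true else pvStreakLoop (streak + 1) cs)
    else pvStreakLoop 0 cs

def detect_gibberish (word : String) : Bool :=
  let w := (PySem.Str.lower word).toList
  if w.length < 2 || 30 < w.length then true
  else if (PySem.List.pyRange 0 ((w.length : Int) - 4) 1).any (fun i =>
      (PySem.List.pyGet? w i == PySem.List.pyGet? w (i + 1)) &&
      (PySem.List.pyGet? w (i + 1) == PySem.List.pyGet? w (i + 2)) &&
      (PySem.List.pyGet? w (i + 2) == PySem.List.pyGet? w (i + 3)) &&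
      (PySem.List.pyGet? w (i + 3) == PySem.List.pyGet? w (i + 4))) then true
  else if !(w.any (fun c => pvVowels.contains c)) then true
  else pvStreakLoop 0 w

-- ===== PORT B =====
-- Source B's _runs helper: maximal runs of equal key-values as (key, run_length) pairs;
-- the inner 'while j < len(s) and key(s[j]) == k' scan is takeWhile/dropWhile.
def pvRunsBy {κ : Type} [BEq κ] (key : Char → κ) : List Char → List (κ × Nat)
  | [] => []
  | c :: rest =>
    (key c, 1 + (rest.takeWhile (fun x => key x == key c)).length) ::
      pvRunsBy key (rest.dropWhile (fun x => key x == key c))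
termination_by l => l.length
decreasing_by
  exact Nat.lt_succ_of_le (List.length_dropWhile_le _ _)

def detect_gibberish_alt (word : String) : Bool :=
  let w := (PySem.Str.lower word).toList
  if w.length < 2 || 30 < w.length then true
  else if (pvRunsBy (fun c => c) w).any (fun g => decide (5 ≤ g.2)) then true
  else if !(w.any (fun c => pvVowels.contains c)) then true
  else (pvRunsBy (fun c => !(pvVowels.contains c)) w).any (fun g => g.1 && decide (8 ≤ g.2))

-- ===== PRECONDITION & SPEC =====
def Spec_detect_gibberish (word : String) (out : Bool) : Prop := out = detect_gibberish_alt word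
instance (word : String) (out : Bool) : Decidable (Spec_detect_gibberish word out) := by unfold Spec_detect_gibberish; infer_instance

-- ===== CLAIM (what is proved, stated in full; the proofs are below) =====
def Claim_equal_detect_gibberish : Prop := ∀ (word : String), Dom_detect_gibberish word → Spec_detect_gibberish word (detect_gibberish word)

-- ===== LEMMAS AND PROOFS =====

-- "some window of 5 consecutive equal characters", stated as adjacent equalities
def pvP (l : List Char) : Prop :=
  ∃ i : Nat, i + 4 < l.length ∧ ∀ j < 4, l[i + j]? = l[i + j + 1]?

-- B's consonant-group check as a named function (only used in the proofs)
def pvGB (l : List Char) : Bool :=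
  (pvRunsBy (fun c => !(pvVowels.contains c)) l).any (fun g => g.1 && decide (8 ≤ g.2))

lemma pvGB_skip (l : List Char) :
    pvGB (l.dropWhile (fun x => pvVowels.contains x)) = pvGB l := by
  cases l with
  | nil => rfl
  | cons c cs =>
    by_cases hc : c ∈ pvVowels
    · conv_rhs => rw [pvGB, pvRunsBy]
      simp [hc, pvGB]
    · simp [hc]

lemma pvGB_expand (l : List Char) :
    pvGB l = (decide (8 ≤ (l.takeWhile (fun x => !(pvVowels.contains x))).length)
      || pvGB (l.dropWhile (fun x => !(pvVowels.contains x)))) := by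
  cases l with
  | nil => rfl
  | cons c cs =>
    by_cases hc : c ∈ pvVowels
    · simp [hc]
    · conv_lhs => rw [pvGB, pvRunsBy]
      simp [hc, pvGB, Nat.add_comm]

lemma pvGB_cons_vowel (c : Char) (cs : List Char) (hc : c ∈ pvVowels) :
    pvGB (c :: cs) = pvGB cs := by
  rw [← pvGB_skip (c :: cs), ← pvGB_skip cs]
  simp [hc]

lemma pvStreak_eq (l : List Char) : ∀ k : Int, 0 ≤ k → k ≤ 7 →
    pvStreakLoop k l = (decide ((8 : Int) ≤ k + ((l.takeWhile (fun x => !(pvVowels.contains x))).length : Int))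
      || pvGB (l.dropWhile (fun x => !(pvVowels.contains x)))) := by
  induction l with
  | nil =>
    intro k h0 h7
    have hk : ¬ ((8:Int) ≤ k) := by omega
    simp [pvStreakLoop, pvGB, pvRunsBy, hk]
  | cons c cs ih =>
    intro k h0 h7
    by_cases hc : c ∈ pvVowels
    · have h1 : pvStreakLoop 0 cs = pvGB cs := by
        rw [ih 0 (by omega) (by omega), pvGB_expand cs]
        congr 1
        simp only [decide_eq_decide]
        omega
      have hk : ¬ ((8:Int) ≤ k) := by omega
      rw [pvStreakLoop]
      simp [hc, hk, h1, pvGB_cons_vowel c cs hc]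
    · rw [pvStreakLoop]
      by_cases hk7 : (7:Int) < k + 1
      · simp [hc, hk7]
        left
        omega
      · rw [ih (k+1) (by omega) (by omega)]
        simp only [List.takeWhile_cons, List.dropWhile_cons]
        have hknot : ¬ ((7:Int) ≤ k) := by omega
        simp [hc, hknot]
        congr 1
        simp only [decide_eq_decide]
        omega

lemma pvStreak_gB (l : List Char) : pvStreakLoop 0 l = pvGB l := by
  rw [pvStreak_eq l 0 (by omega) (by omega), pvGB_expand l]
  congr 1
  simp only [decide_eq_decide]
  omega

lemma pvP_nil : ¬ pvP [] := by
  rintro ⟨i, hi, -⟩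
  simp at hi

lemma pvIdx_run (c : Char) (t d : List Char) (ht : ∀ x ∈ t, x = c) :
    ∀ k, k < t.length + 1 → (c :: t ++ d)[k]? = some c := by
  intro k hk
  match k with
  | 0 => rfl
  | m + 1 =>
    have hm : m < t.length := by omega
    rw [List.cons_append, List.getElem?_cons_succ, List.getElem?_append_left hm,
      List.getElem?_eq_getElem hm]
    exact congrArg some (ht _ (List.getElem_mem hm))

lemma pvIdx_shift (c : Char) (t d : List Char) :
    ∀ m, (c :: t ++ d)[t.length + 1 + m]? = d[m]? := by
  intro m
  rw [List.cons_append, show t.length + 1 + m = (t.length + m) + 1 by omega,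
    List.getElem?_cons_succ, List.getElem?_append_right (by omega)]
  congr 1
  omega

lemma pvP_cons_decomp (c : Char) (t d : List Char)
    (ht : ∀ x ∈ t, x = c) (hd : ∀ y, d.head? = some y → y ≠ c) :
    pvP (c :: t ++ d) ↔ 5 ≤ t.length + 1 ∨ pvP d := by
  have hlen : (c :: t ++ d).length = t.length + 1 + d.length := by simp; omega
  constructor
  · rintro ⟨i, hi, hadj⟩
    rw [hlen] at hi
    by_cases h1 : i + 4 < t.length + 1
    · left; omega
    · by_cases h2 : t.length + 1 ≤ i
      · right
        refine ⟨i - (t.length + 1), by omega, fun j hj => ?_⟩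
        have e1 := pvIdx_shift c t d (i - (t.length + 1) + j)
        have e2 := pvIdx_shift c t d (i - (t.length + 1) + j + 1)
        rw [show t.length + 1 + (i - (t.length + 1) + j) = i + j by omega] at e1
        rw [show t.length + 1 + (i - (t.length + 1) + j + 1) = i + j + 1 by omega] at e2
        rw [← e1, ← e2]
        exact hadj j hj
      · exfalso
        have hdne : d ≠ [] := by
          intro h
          subst h
          simp at hi
          omega
        obtain ⟨y, ds, rfl⟩ : ∃ y ds, d = y :: ds := by
          cases d with
          | nil => exact absurd rfl hdne
          | cons y ds => exact ⟨y, ds, rfl⟩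
        have hy : (y :: ds).head? = some y := rfl
        have hj4 : t.length - i < 4 := by omega
        have := hadj (t.length - i) hj4
        rw [show i + (t.length - i) = t.length by omega] at this
        have hc1 : (c :: t ++ (y :: ds))[t.length]? = some c :=
          pvIdx_run c t (y :: ds) ht t.length (by omega)
        have hc2 : (c :: t ++ (y :: ds))[t.length + 1]? = some y := by
          have := pvIdx_shift c t (y :: ds) 0
          rw [show t.length + 1 + 0 = t.length + 1 by omega] at this
          rw [this]
          rfl
        rw [hc1, hc2] at this
        exact hd y hy (by injection this.symm)
  · rintro (h5 | ⟨i, hi, hadj⟩)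
    · refine ⟨0, by rw [hlen]; omega, fun j hj => ?_⟩
      rw [pvIdx_run c t d ht (0 + j) (by omega), pvIdx_run c t d ht (0 + j + 1) (by omega)]
    · refine ⟨t.length + 1 + i, by rw [hlen]; omega, fun j hj => ?_⟩
      have e1 := pvIdx_shift c t d (i + j)
      have e2 := pvIdx_shift c t d (i + j + 1)
      rw [show t.length + 1 + (i + j) = t.length + 1 + i + j by omega] at e1
      rw [show t.length + 1 + (i + j + 1) = t.length + 1 + i + j + 1 by omega] at e2
      rw [e1, e2]
      exact hadj j hj

lemma pvWin_iff (l : List Char) :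
    ((PySem.List.pyRange 0 ((l.length : Int) - 4) 1).any (fun i =>
      (PySem.List.pyGet? l i == PySem.List.pyGet? l (i + 1)) &&
      (PySem.List.pyGet? l (i + 1) == PySem.List.pyGet? l (i + 2)) &&
      (PySem.List.pyGet? l (i + 2) == PySem.List.pyGet? l (i + 3)) &&
      (PySem.List.pyGet? l (i + 3) == PySem.List.pyGet? l (i + 4))) = true) ↔ pvP l := by
  rw [PySem.List.pyRange_one]
  simp [List.any_eq_true, List.mem_range]
  simp only [show ∀ x : Nat, ((x:Int) + 1) = (((x+1 : Nat)) : Int) from fun x => by push_cast; ring,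
    show ∀ x : Nat, ((x:Int) + 2) = (((x+2 : Nat)) : Int) from fun x => by push_cast; ring,
    show ∀ x : Nat, ((x:Int) + 3) = (((x+3 : Nat)) : Int) from fun x => by push_cast; ring,
    show ∀ x : Nat, ((x:Int) + 4) = (((x+4 : Nat)) : Int) from fun x => by push_cast; ring,
    PySem.List.pyGet?_natCast]
  constructor
  · rintro ⟨x, hx, ⟨⟨h1, h2⟩, h3⟩, h4⟩
    refine ⟨x, by omega, fun j hj => ?_⟩
    interval_cases j
    · exact h1
    · exact h2
    · exact h3
    · exact h4
  · rintro ⟨i, hi, hadj⟩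
    exact ⟨i, by omega, ⟨⟨hadj 0 (by omega), hadj 1 (by omega)⟩, hadj 2 (by omega)⟩,
      hadj 3 (by omega)⟩

lemma pvRun5_iff (l : List Char) :
    ((pvRunsBy (fun c => c) l).any (fun g => decide (5 ≤ g.2)) = true) ↔ pvP l := by
  fun_induction pvRunsBy (fun c => c) l with
  | case1 => simpa using pvP_nil
  | case2 c rest ih =>
    have ht : ∀ x ∈ rest.takeWhile (fun x => x == c), x = c := fun x hx => by
      simpa using List.mem_takeWhile_imp hx
    have hd : ∀ y, (rest.dropWhile (fun x => x == c)).head? = some y → y ≠ c := by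
      intro y hy
      have hne : rest.dropWhile (fun x => x == c) ≠ [] := by
        intro h; rw [h] at hy; simp at hy
      have h2 := List.head_dropWhile_not (fun x => x == c) hne
      rw [List.head?_eq_some_head hne] at hy
      injection hy with hy'
      rw [hy'] at h2
      simpa using h2
    rw [List.any_cons]
    simp only [Bool.or_eq_true, decide_eq_true_eq, ih]
    conv_rhs => rw [← List.takeWhile_append_dropWhile (p := fun x => x == c) (l := rest)]
    rw [show (c :: (rest.takeWhile (fun x => x == c) ++ rest.dropWhile (fun x => x == c))) =
      (c :: rest.takeWhile (fun x => x == c) ++ rest.dropWhile (fun x => x == c)) from rfl]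
    rw [pvP_cons_decomp c _ _ ht hd]
    constructor <;> rintro (h | h)
    · exact Or.inl (by omega)
    · exact Or.inr h
    · exact Or.inl (by omega)
    · exact Or.inr h

-- ===== VERDICT (by name: the statement is the Claim_ definition above) =====
theorem detect_gibberish_spec : Claim_equal_detect_gibberish := by
  intro word _
  simp only [Spec_detect_gibberish, detect_gibberish, detect_gibberish_alt]
  set w := (PySem.Str.lower word).toList with hw
  rw [show ((PySem.List.pyRange 0 ((w.length : Int) - 4) 1).any (fun i =>
      (PySem.List.pyGet? w i == PySem.List.pyGet? w (i + 1)) &&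
      (PySem.List.pyGet? w (i + 1) == PySem.List.pyGet? w (i + 2)) &&
      (PySem.List.pyGet? w (i + 2) == PySem.List.pyGet? w (i + 3)) &&
      (PySem.List.pyGet? w (i + 3) == PySem.List.pyGet? w (i + 4)))) =
      ((pvRunsBy (fun c => c) w).any (fun g => decide (5 ≤ g.2))) from
        Bool.eq_iff_iff.mpr ((pvWin_iff w).trans (pvRun5_iff w).symm),
      pvStreak_gB]
  rfl
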